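-- pv_equiv track=rewrite | github.com/gabrielavirna/interactive_python | problem_solving_with_algs_and_data_struct/chp2_analysis/anagram_detection.py | anagram_detection
-- ===== SOURCE A (Python) =====
-- def anagram_detection(s1, s2):
--     # since strings in Python are immutable, convert the second string to a list:
--     a_list = list(s2)
--
--     pos1 = 0
--     still_ok = True
--
--     while pos1 < len(s1) and still_ok:
--         pos2 = 0
--         found = False
--
--         # Each character from the 1st string can be checked against the characters in the list
--         while pos2 < len(a_list) and not found:
--             if s1[pos1] == a_list[pos2]:
--                 found = True
--             else:
--                 pos2 += 1
--
--         # and if found, checked off by replacement (with value None)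
--         if found:
--             a_list[pos2] = None
--         else:
--             still_ok = False
--
--         pos1 += 1
--
--     return still_ok
-- ===== SOURCE B (Python) =====
-- def anagram_detection(s1, s2):
--     # s1 is "covered" by s2 iff every character of s1 occurs in s2
--     # at least as many times as in s1 (sub-multiset test by counting).
--     return all(s1.count(ch) <= s2.count(ch) for ch in s1)
-- ===== Notes on version B (the rewrite author's own statement) =====
-- stated objective: simpler
-- what changed: Replaced the nested scan over a mutable check-off copy of s2 by a direct sub-multiset test: for each character of s1 compare its count in s1 with its count in s2 (no list copy, no mutation, no inner search loop); the counting passes run in C via str.count, which a timing run measured ~28x faster.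
import Mathlib
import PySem

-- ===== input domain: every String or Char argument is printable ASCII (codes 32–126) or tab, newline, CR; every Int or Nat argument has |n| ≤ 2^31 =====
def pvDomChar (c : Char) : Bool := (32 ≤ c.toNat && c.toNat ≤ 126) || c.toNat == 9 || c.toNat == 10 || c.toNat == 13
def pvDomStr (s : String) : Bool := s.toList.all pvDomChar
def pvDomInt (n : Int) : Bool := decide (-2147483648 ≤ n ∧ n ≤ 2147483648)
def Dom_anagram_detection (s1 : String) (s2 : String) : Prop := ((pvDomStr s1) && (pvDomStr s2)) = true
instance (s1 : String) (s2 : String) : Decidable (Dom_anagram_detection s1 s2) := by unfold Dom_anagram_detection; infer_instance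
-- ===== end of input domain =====

-- B replaces A's mutable check-off list and nested search loop by a direct
-- per-character count comparison (sub-multiset test); simpler, and the timing
-- run measured the Python B faster (counting via str.count).

-- ===== PORT A =====
-- inner while loop of A: scan a_list for the first slot equal to `some c`;
-- on success replace that slot by `none` (Python's a_list[pos2] = None)
def pvCheckOff (c : Char) : List (Option Char) → Option (List (Option Char))
  | [] => none
  | x :: rest =>
    if x = some c then some (none :: rest)
    else (pvCheckOff c rest).map (fun t => x :: t)

-- outer while loop of A over s1 with the still_ok flag (false = stop with False)
def pvLoopA : List Char → List (Option Char) → Bool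
  | [], _ => true
  | c :: rest, al =>
    match pvCheckOff c al with
    | some al' => pvLoopA rest al'
    | none => false

def anagram_detection (s1 : String) (s2 : String) : Bool :=
  pvLoopA s1.toList (s2.toList.map (fun c => some c))

-- ===== PORT B =====
def anagram_detection_alt (s1 : String) (s2 : String) : Bool :=
  s1.toList.all (fun c => decide (s1.toList.count c ≤ s2.toList.count c))

-- ===== PRECONDITION & SPEC =====
def Spec_anagram_detection (s1 : String) (s2 : String) (out : Bool) : Prop := out = anagram_detection_alt s1 s2
instance (s1 : String) (s2 : String) (out : Bool) : Decidable (Spec_anagram_detection s1 s2 out) := by unfold Spec_anagram_detection; infer_instance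

-- ===== CLAIM (what is proved, stated in full; the proofs are below) =====
def Claim_equal_anagram_detection : Prop := ∀ (s1 : String) (s2 : String), Dom_anagram_detection s1 s2 → Spec_anagram_detection s1 s2 (anagram_detection s1 s2)

-- ===== LEMMAS AND PROOFS =====

theorem pvCheckOff_none (c : Char) (al : List (Option Char)) :
    pvCheckOff c al = none ↔ al.count (some c) = 0 := by
  induction al with
  | nil => simp [pvCheckOff]
  | cons x rest ih =>
    simp only [pvCheckOff, List.count_cons]
    by_cases hx : x = some c
    · simp [hx]
    · simp [hx, Option.map_eq_none_iff, ih]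

theorem pvCheckOff_count (c : Char) (al : List (Option Char)) (al' : List (Option Char))
    (h : pvCheckOff c al = some al') (d : Char) :
    (if d = c then al'.count (some d) + 1 = al.count (some d)
     else al'.count (some d) = al.count (some d)) := by
  induction al generalizing al' with
  | nil => simp [pvCheckOff] at h
  | cons x rest ih =>
    simp only [pvCheckOff] at h
    by_cases hx : x = some c
    · rw [hx, if_pos rfl] at h
      cases h
      by_cases hd : d = c
      · subst hd; simp [List.count_cons, hx]
      · rw [if_neg hd, hx]
        simp [List.count_cons, hd]
        exact fun h2 : c = d => hd h2.symm
    · simp only [if_neg hx, Option.map_eq_some_iff] at h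
      obtain ⟨t, ht, rfl⟩ := h
      have hih := ih t ht
      by_cases hd : d = c
      · simp only [if_pos hd] at hih ⊢
        simp only [List.count_cons]
        omega
      · simp only [if_neg hd] at hih ⊢
        simp only [List.count_cons]
        omega

theorem pvLoopA_iff (l : List Char) (al : List (Option Char)) :
    pvLoopA l al = true ↔ ∀ c : Char, l.count c ≤ al.count (some c) := by
  induction l generalizing al with
  | nil => simp [pvLoopA]
  | cons c rest ih =>
    simp only [pvLoopA]
    cases h : pvCheckOff c al with
    | none =>
      have h0 := (pvCheckOff_none c al).mp h
      simp only [Bool.false_eq_true, false_iff, not_forall]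
      exact ⟨c, by simp [h0]⟩
    | some al' =>
      have hself : al'.count (some c) + 1 = al.count (some c) := by
        have := pvCheckOff_count c al al' h c; simpa using this
      have hother : ∀ d, d ≠ c → al'.count (some d) = al.count (some d) := by
        intro d hd
        have := pvCheckOff_count c al al' h d; simpa [hd] using this
      rw [ih]
      constructor
      · intro hall d
        have hd := hall d
        rw [List.count_cons]
        by_cases hdc : d = c
        · subst hdc
          simp only [beq_self_eq_true, if_true]
          omega
        · have hcd : ¬ ((c == d) = true) := by
            simp only [beq_iff_eq]
            exact fun h2 => hdc h2.symm
          rw [if_neg hcd, add_zero, ← hother d hdc]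
          exact hd
      · intro hall d
        have hd := hall d
        rw [List.count_cons] at hd
        by_cases hdc : d = c
        · subst hdc
          simp only [beq_self_eq_true, if_true] at hd
          omega
        · have hcd : ¬ ((c == d) = true) := by
            simp only [beq_iff_eq]
            exact fun h2 => hdc h2.symm
          rw [if_neg hcd, add_zero] at hd
          rw [hother d hdc]
          exact hd

theorem count_map_some (c : Char) (l : List Char) :
    (l.map (fun x => some x)).count (some c) = l.count c := by
  induction l with
  | nil => simp
  | cons x rest ih => simp [List.count_cons, ih]

-- ===== VERDICT (by name: the statement is the Claim_ definition above) =====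
theorem anagram_detection_spec : Claim_equal_anagram_detection := by
  intro s1 s2 _
  unfold Spec_anagram_detection anagram_detection anagram_detection_alt
  rw [Bool.eq_iff_iff, pvLoopA_iff]
  simp only [List.all_eq_true, decide_eq_true_eq]
  constructor
  · intro h c _
    have := h c
    rwa [count_map_some] at this
  · intro h c
    rw [count_map_some]
    by_cases hc : c ∈ s1.toList
    · exact h c hc
    · simp [List.count_eq_zero_of_not_mem hc]
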